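-- pv_equiv track=rewrite | github.com/pyspn/pyspn | reordering/masks/reorder.py | is_dim_eq
-- ===== SOURCE A (Python) =====
-- def is_dim_eq(dims):
--     x, y = None, None
--     for dim in dims:
--         if x is None:
--             x = dim[0]
--             y = dim[1]
--         else:
--             if x != dim[0] or y != dim[1]:
--                 return False
--     return True
-- ===== SOURCE B (Python) =====
-- def is_dim_eq(dims):
--     return len({(d[0], d[1]) for d in dims}) <= 1
-- ===== Notes on version B (the rewrite author's own statement) =====
-- stated objective: idiomatic
-- what changed: Replaces the running-reference loop with early return by building the set of distinct (d[0], d[1]) pairs and checking it has at most one element.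
import Mathlib
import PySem

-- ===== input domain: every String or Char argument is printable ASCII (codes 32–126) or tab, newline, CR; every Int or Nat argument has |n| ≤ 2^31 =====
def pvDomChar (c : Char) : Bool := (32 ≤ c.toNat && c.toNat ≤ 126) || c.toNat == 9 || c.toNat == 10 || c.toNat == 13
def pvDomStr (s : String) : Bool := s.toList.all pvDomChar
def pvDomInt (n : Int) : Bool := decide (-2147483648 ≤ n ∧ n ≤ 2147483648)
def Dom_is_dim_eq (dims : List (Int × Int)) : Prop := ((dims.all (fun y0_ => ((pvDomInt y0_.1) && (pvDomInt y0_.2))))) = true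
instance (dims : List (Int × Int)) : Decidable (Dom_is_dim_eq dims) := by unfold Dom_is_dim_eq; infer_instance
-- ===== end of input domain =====

-- B replaces A's running-reference loop by collecting the distinct coordinate pairs
-- into a set and checking its size is at most one (idiomatic; same cost).

-- ===== PORT A =====
-- the 'for dim in dims' loop with the Optional reference (x, y) and the early 'return False'
def is_dim_eq_loop (rest : List (Int × Int)) (xy : Option (Int × Int)) : Bool :=
  match rest, xy with
  | [], _ => true
  | dim :: rest, none => is_dim_eq_loop rest (some (dim.1, dim.2))
  | dim :: rest, some (x, y) =>
      if x ≠ dim.1 ∨ y ≠ dim.2 then false else is_dim_eq_loop rest (some (x, y))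

def is_dim_eq (dims : List (Int × Int)) : Bool :=
  is_dim_eq_loop dims none

-- ===== PORT B =====
-- len({(d[0], d[1]) for d in dims}) <= 1
def is_dim_eq_alt (dims : List (Int × Int)) : Bool :=
  PySem.Set.len (PySem.Set.ofList (dims.map (fun d => (d.1, d.2)))) ≤ 1

-- ===== PRECONDITION & SPEC =====
def Spec_is_dim_eq (dims : List (Int × Int)) (out : Bool) : Prop := out = is_dim_eq_alt dims
instance (dims : List (Int × Int)) (out : Bool) : Decidable (Spec_is_dim_eq dims out) := by unfold Spec_is_dim_eq; infer_instance

-- ===== CLAIM (what is proved, stated in full; the proofs are below) =====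
def Claim_equal_is_dim_eq : Prop := ∀ (dims : List (Int × Int)), Dom_is_dim_eq dims → Spec_is_dim_eq dims (is_dim_eq dims)

-- ===== LEMMAS AND PROOFS =====

-- A's loop after seeing the first pair (x, y): true iff every remaining dim equals it
theorem loop_all (rest : List (Int × Int)) (x y : Int) :
    is_dim_eq_loop rest (some (x, y)) = rest.all (fun d => d == (x, y)) := by
  induction rest with
  | nil => rfl
  | cons d rest ih =>
      obtain ⟨a, b⟩ := d
      by_cases h : a = x ∧ b = y
      · simp [is_dim_eq_loop, h.1, h.2, ih]
      · have hcond : x ≠ a ∨ y ≠ b := by tauto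
        simp only [is_dim_eq_loop]
        rw [if_pos hcond]
        simp [h]

theorem length_le_foldl_add (rest : List (Int × Int)) (s : PySem.Set (Int × Int)) :
    s.length ≤ (rest.foldl PySem.Set.add s).length := by
  induction rest generalizing s with
  | nil => exact le_rfl
  | cons d rest ih =>
      refine le_trans ?_ (ih (PySem.Set.add s d))
      simp only [PySem.Set.add]
      split_ifs <;> simp

-- B's set built from the first pair p and the rest: at most one element iff rest is all p
theorem set_all_aux (rest : List (Int × Int)) (p : Int × Int) :
    decide ((rest.foldl PySem.Set.add [p]).length ≤ 1) = rest.all (fun d => d == p) := by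
  induction rest with
  | nil => rfl
  | cons d rest ih =>
      by_cases h : d = p
      · subst h
        simp [ih]
      · have h3 := length_le_foldl_add rest [p, d]
        have h4 : ¬ ((rest.foldl PySem.Set.add [p, d]).length ≤ 1) := by
          simp only [List.length_cons] at h3
          omega
        simp [h4, h]

theorem set_all (rest : List (Int × Int)) (p : Int × Int) :
    decide ((PySem.Set.len (PySem.Set.ofList (p :: rest))) ≤ 1) = rest.all (fun d => d == p) := by
  have h0 : PySem.Set.ofList (p :: rest) = rest.foldl PySem.Set.add [p] := rfl
  have h1 : PySem.Set.len (rest.foldl PySem.Set.add [p])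
      = ((rest.foldl PySem.Set.add [p]).length : Int) := rfl
  simp only [h0, h1, Nat.cast_le_one]
  exact set_all_aux rest p

-- ===== VERDICT (by name: the statement is the Claim_ definition above) =====
theorem is_dim_eq_spec : Claim_equal_is_dim_eq := by
  intro dims _
  unfold Spec_is_dim_eq is_dim_eq is_dim_eq_alt
  cases dims with
  | nil => rfl
  | cons d rest =>
      have hmap : (d :: rest).map (fun d => (d.1, d.2)) = d :: rest := by simp
      simp only [hmap]
      have hstep : is_dim_eq_loop (d :: rest) none = is_dim_eq_loop rest (some (d.1, d.2)) := rfl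
      rw [hstep, loop_all, set_all]
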